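-- pv_equiv track=rewrite | github.com/cryptonitross/omaha-reader-1 | src/core/service/moves_by_street.py | group_moves_by_street_simple
-- ===== SOURCE A (Python) =====
-- from typing import List, Union, Tuple, Dict
--
-- def group_moves_by_street_simple(player_moves: Dict[str, List[str]]) -> Dict[str, List[str]]:
--     street_moves = {
--         "preflop": [],
--         "flop": [],
--         "turn": [],
--         "river": []
--     }
--
--     position_order = ['SB', 'BB', 'UTG', 'MP', 'CO', 'BTN']
--
--     all_moves = []
--     for position in position_order:
--         if position in player_moves:
--             all_moves.extend(player_moves[position])
--
--     current_street_idx = 0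
--     streets = ["preflop", "flop", "turn", "river"]
--     consecutive_checks = 0
--     last_was_aggressive = False
--
--     for move in all_moves:
--         current_street = streets[min(current_street_idx, 3)]
--         street_moves[current_street].append(move)
--
--         if move in ["check"]:
--             consecutive_checks += 1
--             if consecutive_checks >= 2 and last_was_aggressive:
--                 current_street_idx = min(current_street_idx + 1, 3)
--                 consecutive_checks = 0
--         elif move in ["bet", "raise"]:
--             last_was_aggressive = True
--             consecutive_checks = 0
--         elif move == "call":
--             consecutive_checks = 0
--
--     return street_moves
-- ===== SOURCE B (Python) =====
-- def group_moves_by_street_simple(player_moves):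
--     position_order = ['SB', 'BB', 'UTG', 'MP', 'CO', 'BTN']
--     moves = [m for pos in position_order for m in player_moves.get(pos, [])]
--
--     def end_of_street(start, aggressive):
--         """Return (end, aggressive') where moves[start:end] is one full street.
--
--         A street ends right after a 'check' whose nearest preceding relevant
--         move (check/bet/raise/call) within the street is also a 'check',
--         provided some bet/raise has been seen anywhere before it.
--         """
--         prev_relevant = None
--         for i in range(start, len(moves)):
--             m = moves[i]
--             if m == "check":
--                 if aggressive and prev_relevant == "check":
--                     return i + 1, aggressive
--             elif m in ("bet", "raise"):
--                 aggressive = True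
--             if m in ("check", "bet", "raise", "call"):
--                 prev_relevant = m
--         return len(moves), aggressive
--
--     b1, agg = end_of_street(0, False)
--     b2, agg = end_of_street(b1, agg)
--     b3, _ = end_of_street(b2, agg)
--     return {
--         "preflop": moves[:b1],
--         "flop": moves[b1:b2],
--         "turn": moves[b2:b3],
--         "river": moves[b3:],
--     }
-- ===== Notes on version B (the rewrite author's own statement) =====
-- stated objective: alternative
-- what changed: B drops A's running state machine (street index clamp, consecutive-check counter) and instead finds the three street boundaries directly: a street ends at a 'check' whose nearest preceding relevant move within the street is also a 'check' after aggression has been seen; three boundary searches then slice the flattened list.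
import Mathlib
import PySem

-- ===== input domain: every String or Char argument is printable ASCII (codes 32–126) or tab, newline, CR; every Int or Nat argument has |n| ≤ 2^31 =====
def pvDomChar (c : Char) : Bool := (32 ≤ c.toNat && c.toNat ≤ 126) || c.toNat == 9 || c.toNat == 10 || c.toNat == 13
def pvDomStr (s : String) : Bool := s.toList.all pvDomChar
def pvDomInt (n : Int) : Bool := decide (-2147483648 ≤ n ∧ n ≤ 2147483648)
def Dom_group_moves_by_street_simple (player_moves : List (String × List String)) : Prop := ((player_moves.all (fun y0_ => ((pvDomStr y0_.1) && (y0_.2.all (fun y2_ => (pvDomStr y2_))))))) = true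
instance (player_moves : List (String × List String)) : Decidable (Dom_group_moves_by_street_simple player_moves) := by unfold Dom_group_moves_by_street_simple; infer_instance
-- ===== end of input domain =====

-- B replaces A's per-move state machine (street index with clamp, consecutive-check counter)
-- by three direct boundary searches — a street ends at a 'check' whose nearest preceding
-- relevant move in the street is a 'check', once aggression has been seen — then slices.

-- ===== PORT A =====
-- dict key lookup (first match) on the association list
def pvLookupA (pm : List (String × List String)) (pos : String) : Option (List String) :=
  (pm.find? (fun kv => kv.1 == pos)).map (·.2)

-- 'for position in position_order: if position in player_moves: all_moves.extend(...)'
def pvFlattenA (pm : List (String × List String)) : List String :=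
  ["SB", "BB", "UTG", "MP", "CO", "BTN"].foldl
    (fun acc pos => match pvLookupA pm pos with
      | some v => acc ++ v
      | none => acc) []

-- the move loop: state (preflop, flop, turn, river, current_street_idx, consecutive_checks, last_was_aggressive)
def pvLoopA : List String → List String → List String → List String → List String → Nat → Nat → Bool →
    List String × List String × List String × List String
  | [], p, f, t, r, _, _, _ => (p, f, t, r)
  | m :: ms, p, f, t, r, idx, ch, ag =>
    let j := min idx 3
    let p' := if j = 0 then p ++ [m] else p
    let f' := if j = 1 then f ++ [m] else f
    let t' := if j = 2 then t ++ [m] else t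
    let r' := if j = 3 then r ++ [m] else r
    if m = "check" then
      if ch + 1 ≥ 2 ∧ ag then pvLoopA ms p' f' t' r' (min (idx + 1) 3) 0 ag
      else pvLoopA ms p' f' t' r' idx (ch + 1) ag
    else if m = "bet" ∨ m = "raise" then pvLoopA ms p' f' t' r' idx 0 true
    else if m = "call" then pvLoopA ms p' f' t' r' idx 0 ag
    else pvLoopA ms p' f' t' r' idx ch ag

def group_moves_by_street_simple (player_moves : List (String × List String)) : List (String × List String) :=
  let all := pvFlattenA player_moves
  let (p, f, t, r) := pvLoopA all [] [] [] [] 0 0 false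
  [("preflop", p), ("flop", f), ("turn", t), ("river", r)]

-- ===== PORT B =====
-- 'moves = [m for pos in position_order for m in player_moves.get(pos, [])]'
def pvFlattenB (pm : List (String × List String)) : List String :=
  ["SB", "BB", "UTG", "MP", "CO", "BTN"].foldl
    (fun acc pos => acc ++ (((pm.find? (fun kv => kv.1 == pos)).map (·.2)).getD [])) []

-- end_of_street: scan moves[start:] (here: the suffix) tracking prev_relevant and aggressive;
-- returns (length of the street segment, aggressive'); early return at the closing check
def pvEndB : List String → Option String → Bool → Nat × Bool
  | [], _, ag => (0, ag)
  | m :: ms, prev, ag =>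
    if m = "check" then
      if ag ∧ prev = some "check" then (1, ag)
      else
        let (n, ag') := pvEndB ms (some "check") ag
        (n + 1, ag')
    else if m = "bet" ∨ m = "raise" then
      let (n, ag') := pvEndB ms (some m) true
      (n + 1, ag')
    else if m = "call" then
      let (n, ag') := pvEndB ms (some "call") ag
      (n + 1, ag')
    else
      let (n, ag') := pvEndB ms prev ag
      (n + 1, ag')

def group_moves_by_street_simple_alt (player_moves : List (String × List String)) : List (String × List String) :=
  let moves := pvFlattenB player_moves
  let (n1, a1) := pvEndB moves none false
  let (n2, a2) := pvEndB (moves.drop n1) none a1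
  let (n3, _) := pvEndB ((moves.drop n1).drop n2) none a2
  [("preflop", moves.take n1),
   ("flop", (moves.drop n1).take n2),
   ("turn", ((moves.drop n1).drop n2).take n3),
   ("river", ((moves.drop n1).drop n2).drop n3)]

-- ===== PRECONDITION & SPEC =====
def Spec_group_moves_by_street_simple (player_moves : List (String × List String)) (out : List (String × List String)) : Prop := out = group_moves_by_street_simple_alt player_moves
instance (player_moves : List (String × List String)) (out : List (String × List String)) : Decidable (Spec_group_moves_by_street_simple player_moves out) := by unfold Spec_group_moves_by_street_simple; infer_instance

-- ===== CLAIM =====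
def Claim_equal_group_moves_by_street_simple : Prop := ∀ (player_moves : List (String × List String)), Dom_group_moves_by_street_simple player_moves → Spec_group_moves_by_street_simple player_moves (group_moves_by_street_simple player_moves)

-- ===== LEMMAS AND PROOFS =====

theorem pvFlatten_eq (pm : List (String × List String)) : pvFlattenA pm = pvFlattenB pm := by
  simp only [pvFlattenA, pvFlattenB, pvLookupA]
  simp only [List.foldl]
  cases h1 : pm.find? (fun kv => kv.1 == "SB") <;>
  cases h2 : pm.find? (fun kv => kv.1 == "BB") <;>
  cases h3 : pm.find? (fun kv => kv.1 == "UTG") <;>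
  cases h4 : pm.find? (fun kv => kv.1 == "MP") <;>
  cases h5 : pm.find? (fun kv => kv.1 == "CO") <;>
  cases h6 : pm.find? (fun kv => kv.1 == "BTN") <;> simp

def pvInv (ch : Nat) (prev : Option String) : Prop := (1 ≤ ch ↔ prev = some "check")

theorem pvL3 (ms : List String) : ∀ (p f t r : List String) (idx ch : Nat) (ag : Bool),
    3 ≤ idx → pvLoopA ms p f t r idx ch ag = (p, f, t, r ++ ms) := by
  induction ms with
  | nil => intro p f t r idx ch ag h; simp [pvLoopA]
  | cons m ms ih =>
    intro p f t r idx ch ag h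
    have hj : min idx 3 = 3 := by omega
    have hj2 : min (idx + 1) 3 = 3 := by omega
    simp only [pvLoopA, hj, hj2]
    norm_num
    split_ifs <;> rw [ih _ _ _ _ _ _ _ (by omega)] <;> simp

theorem pvL2 (ms : List String) : ∀ (p f t r : List String) (ch : Nat) (ag : Bool) (prev : Option String),
    pvInv ch prev →
    pvLoopA ms p f t r 2 ch ag =
      (p, f, t ++ ms.take (pvEndB ms prev ag).1, r ++ ms.drop (pvEndB ms prev ag).1) := by
  induction ms with
  | nil => intro p f t r ch ag prev _; simp [pvLoopA, pvEndB]
  | cons m ms ih =>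
    intro p f t r ch ag prev hinv
    simp only [pvLoopA, pvEndB]
    norm_num
    by_cases hc : m = "check"
    · subst hc
      norm_num
      by_cases hag : ag = true
      · by_cases hch : 1 ≤ ch
        · have hprev : prev = some "check" := hinv.mp hch
          subst hag hprev
          rw [if_pos (⟨by omega, rfl⟩ : 2 ≤ ch + 1 ∧ true = true),
              if_pos (⟨rfl, rfl⟩ : true = true ∧ some "check" = some "check"),
              pvL3 ms _ _ _ _ 3 0 true (le_refl 3)]
          simp
        · subst hag
          rw [if_neg (fun (h : 2 ≤ ch + 1 ∧ true = true) => hch (by omega)),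
              if_neg (fun (h : true = true ∧ prev = some "check") => hch (hinv.mpr h.2)),
              ih _ _ _ _ (ch + 1) true (some "check") (by simp [pvInv])]
          simp
      · have hag' : ag = false := by simpa using hag
        subst hag'
        norm_num
        rw [ih _ _ _ _ (ch + 1) false (some "check") (by simp [pvInv])]
        simp
    · simp only [if_neg hc]
      by_cases hbr : m = "bet" ∨ m = "raise"
      · rw [if_pos hbr, if_pos hbr,
            ih _ _ _ _ 0 true (some m) (by simp [pvInv, hc])]
        simp
      · rw [if_neg hbr, if_neg hbr]
        by_cases hca : m = "call"
        · rw [if_pos hca, if_pos hca,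
              ih _ _ _ _ 0 ag (some "call") (by simp [pvInv])]
          simp
        · rw [if_neg hca, if_neg hca, ih _ _ _ _ ch ag prev hinv]
          simp

theorem pvTake1 {α : Type} (j : Nat) (a : α) (as : List α) :
    (a :: as).take (1 + j) = a :: as.take j := by rw [Nat.add_comm]; rfl

theorem pvDrop1 {α : Type} (j : Nat) (a : α) (as : List α) :
    (a :: as).drop (1 + j) = as.drop j := by rw [Nat.add_comm]; rfl

theorem pvTakeS {α : Type} (n k : Nat) (a : α) (as : List α) :
    (a :: as).take (n + 1 + k) = a :: as.take (n + k) := by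
  have h : n + 1 + k = (n + k) + 1 := by omega
  rw [h]; rfl

theorem pvDropS {α : Type} (n k : Nat) (a : α) (as : List α) :
    (a :: as).drop (n + 1 + k) = as.drop (n + k) := by
  have h : n + 1 + k = (n + k) + 1 := by omega
  rw [h]; rfl

theorem pvTakeS2 {α : Type} (n k : Nat) (a : α) (as : List α) :
    (a :: as).take (1 + n + k) = a :: as.take (n + k) := by
  have h : 1 + n + k = (n + k) + 1 := by omega
  rw [h]; rfl

theorem pvDropS2 {α : Type} (n k : Nat) (a : α) (as : List α) :
    (a :: as).drop (1 + n + k) = as.drop (n + k) := by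
  have h : 1 + n + k = (n + k) + 1 := by omega
  rw [h]; rfl

theorem pvTakeS3 {α : Type} (n k j : Nat) (a : α) (as : List α) :
    (a :: as).take (n + 1 + k + j) = a :: as.take (n + k + j) := by
  have h : n + 1 + k + j = (n + k + j) + 1 := by omega
  rw [h]; rfl

theorem pvDropS3 {α : Type} (n k j : Nat) (a : α) (as : List α) :
    (a :: as).drop (n + 1 + k + j) = as.drop (n + k + j) := by
  have h : n + 1 + k + j = (n + k + j) + 1 := by omega
  rw [h]; rfl

theorem pvTakeS4 {α : Type} (n k j : Nat) (a : α) (as : List α) :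
    (a :: as).take (1 + n + k + j) = a :: as.take (n + k + j) := by
  have h : 1 + n + k + j = (n + k + j) + 1 := by omega
  rw [h]; rfl

theorem pvDropS4 {α : Type} (n k j : Nat) (a : α) (as : List α) :
    (a :: as).drop (1 + n + k + j) = as.drop (n + k + j) := by
  have h : 1 + n + k + j = (n + k + j) + 1 := by omega
  rw [h]; rfl

theorem pvL1 (ms : List String) : ∀ (p f t r : List String) (ch : Nat) (ag : Bool) (prev : Option String),
    pvInv ch prev →
    pvLoopA ms p f t r 1 ch ag =
      (p, f ++ ms.take (pvEndB ms prev ag).1,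
       t ++ (ms.drop (pvEndB ms prev ag).1).take (pvEndB (ms.drop (pvEndB ms prev ag).1) none (pvEndB ms prev ag).2).1,
       r ++ (ms.drop (pvEndB ms prev ag).1).drop (pvEndB (ms.drop (pvEndB ms prev ag).1) none (pvEndB ms prev ag).2).1) := by
  induction ms with
  | nil => intro p f t r ch ag prev _; simp [pvLoopA, pvEndB]
  | cons m ms ih =>
    intro p f t r ch ag prev hinv
    simp only [pvLoopA, pvEndB]
    norm_num
    by_cases hc : m = "check"
    · subst hc
      norm_num
      by_cases hag : ag = true
      · by_cases hch : 1 ≤ ch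
        · have hprev : prev = some "check" := hinv.mp hch
          subst hag hprev
          rw [if_pos (⟨by omega, rfl⟩ : 2 ≤ ch + 1 ∧ true = true),
              if_pos (⟨rfl, rfl⟩ : true = true ∧ some "check" = some "check"),
              pvL2 ms _ _ _ _ 0 true none (by simp [pvInv])]
          simp [pvTake1, pvDrop1, pvTakeS, pvDropS]
        · subst hag
          rw [if_neg (fun (h : 2 ≤ ch + 1 ∧ true = true) => hch (by omega)),
              if_neg (fun (h : true = true ∧ prev = some "check") => hch (hinv.mpr h.2)),
              ih _ _ _ _ (ch + 1) true (some "check") (by simp [pvInv])]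
          simp [pvTake1, pvDrop1, pvTakeS, pvDropS]
      · have hag' : ag = false := by simpa using hag
        subst hag'
        norm_num
        rw [ih _ _ _ _ (ch + 1) false (some "check") (by simp [pvInv])]
        simp [pvTake1, pvDrop1, pvTakeS, pvDropS]
    · simp only [if_neg hc]
      by_cases hbr : m = "bet" ∨ m = "raise"
      · rw [if_pos hbr, if_pos hbr,
            ih _ _ _ _ 0 true (some m) (by simp [pvInv, hc])]
        simp [pvTake1, pvDrop1, pvTakeS, pvDropS]
      · rw [if_neg hbr, if_neg hbr]
        by_cases hca : m = "call"
        · rw [if_pos hca, if_pos hca,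
              ih _ _ _ _ 0 ag (some "call") (by simp [pvInv])]
          simp [pvTake1, pvDrop1, pvTakeS, pvDropS]
        · rw [if_neg hca, if_neg hca, ih _ _ _ _ ch ag prev hinv]
          simp [pvTake1, pvDrop1, pvTakeS, pvDropS]

theorem pvL0 (ms : List String) : ∀ (p f t r : List String) (ch : Nat) (ag : Bool) (prev : Option String),
    pvInv ch prev →
    pvLoopA ms p f t r 0 ch ag =
      (p ++ ms.take (pvEndB ms prev ag).1,
       f ++ (ms.drop (pvEndB ms prev ag).1).take (pvEndB (ms.drop (pvEndB ms prev ag).1) none (pvEndB ms prev ag).2).1,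
       t ++ ((ms.drop (pvEndB ms prev ag).1).drop (pvEndB (ms.drop (pvEndB ms prev ag).1) none (pvEndB ms prev ag).2).1).take
              (pvEndB ((ms.drop (pvEndB ms prev ag).1).drop (pvEndB (ms.drop (pvEndB ms prev ag).1) none (pvEndB ms prev ag).2).1) none (pvEndB (ms.drop (pvEndB ms prev ag).1) none (pvEndB ms prev ag).2).2).1,
       r ++ ((ms.drop (pvEndB ms prev ag).1).drop (pvEndB (ms.drop (pvEndB ms prev ag).1) none (pvEndB ms prev ag).2).1).drop
              (pvEndB ((ms.drop (pvEndB ms prev ag).1).drop (pvEndB (ms.drop (pvEndB ms prev ag).1) none (pvEndB ms prev ag).2).1) none (pvEndB (ms.drop (pvEndB ms prev ag).1) none (pvEndB ms prev ag).2).2).1) := by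
  induction ms with
  | nil => intro p f t r ch ag prev _; simp [pvLoopA, pvEndB]
  | cons m ms ih =>
    intro p f t r ch ag prev hinv
    simp only [pvLoopA, pvEndB]
    norm_num
    by_cases hc : m = "check"
    · subst hc
      norm_num
      by_cases hag : ag = true
      · by_cases hch : 1 ≤ ch
        · have hprev : prev = some "check" := hinv.mp hch
          subst hag hprev
          rw [if_pos (⟨by omega, rfl⟩ : 2 ≤ ch + 1 ∧ true = true),
              if_pos (⟨rfl, rfl⟩ : true = true ∧ some "check" = some "check"),
              pvL1 ms _ _ _ _ 0 true none (by simp [pvInv])]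
          simp [pvTake1, pvDrop1, pvTakeS, pvDropS, pvTakeS2, pvDropS2, pvTakeS3, pvDropS3, pvTakeS4, pvDropS4]
        · subst hag
          rw [if_neg (fun (h : 2 ≤ ch + 1 ∧ true = true) => hch (by omega)),
              if_neg (fun (h : true = true ∧ prev = some "check") => hch (hinv.mpr h.2)),
              ih _ _ _ _ (ch + 1) true (some "check") (by simp [pvInv])]
          simp [pvTake1, pvDrop1, pvTakeS, pvDropS, pvTakeS2, pvDropS2, pvTakeS3, pvDropS3, pvTakeS4, pvDropS4]
      · have hag' : ag = false := by simpa using hag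
        subst hag'
        norm_num
        rw [ih _ _ _ _ (ch + 1) false (some "check") (by simp [pvInv])]
        simp [pvTake1, pvDrop1, pvTakeS, pvDropS, pvTakeS2, pvDropS2, pvTakeS3, pvDropS3, pvTakeS4, pvDropS4]
    · simp only [if_neg hc]
      by_cases hbr : m = "bet" ∨ m = "raise"
      · rw [if_pos hbr, if_pos hbr,
            ih _ _ _ _ 0 true (some m) (by simp [pvInv, hc])]
        simp [pvTake1, pvDrop1, pvTakeS, pvDropS, pvTakeS2, pvDropS2, pvTakeS3, pvDropS3, pvTakeS4, pvDropS4]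
      · rw [if_neg hbr, if_neg hbr]
        by_cases hca : m = "call"
        · rw [if_pos hca, if_pos hca,
              ih _ _ _ _ 0 ag (some "call") (by simp [pvInv])]
          simp [pvTake1, pvDrop1, pvTakeS, pvDropS, pvTakeS2, pvDropS2, pvTakeS3, pvDropS3, pvTakeS4, pvDropS4]
        · rw [if_neg hca, if_neg hca, ih _ _ _ _ ch ag prev hinv]
          simp [pvTake1, pvDrop1, pvTakeS, pvDropS, pvTakeS2, pvDropS2, pvTakeS3, pvDropS3, pvTakeS4, pvDropS4]


-- ===== VERDICT =====
theorem group_moves_by_street_simple_spec : Claim_equal_group_moves_by_street_simple := by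
  intro pm _
  unfold Spec_group_moves_by_street_simple group_moves_by_street_simple group_moves_by_street_simple_alt
  dsimp only
  rw [pvFlatten_eq,
      pvL0 (pvFlattenB pm) [] [] [] [] 0 false none (by simp [pvInv])]
  rcases h1 : pvEndB (pvFlattenB pm) none false with ⟨n1, a1⟩
  rcases h2 : pvEndB ((pvFlattenB pm).drop n1) none a1 with ⟨n2, a2⟩
  simp [h1, h2]
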